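-- pv_equiv track=rewrite | github.com/JamiesZhang/ClinicalTrials | preprocess/rankingDataset.py | __getFoldAndIndexByTopic
-- ===== SOURCE A (Python) =====
-- __foldNum = 5
--
-- __topicsNumPerFold = 6
--
-- __topicFolds = ((28, 29, 25, 22, 6, 7),
--                 (26, 11, 1, 18, 21, 4),
--                 (19, 24, 27, 30, 12, 23),
--                 (13, 14, 3, 16, 8, 9),
--                 (15, 20, 5, 10, 17, 2))
--
-- def __getIndexByTopic(foldID, topicID):
--     curIndexID = -1
--     for indexID in range(__topicsNumPerFold):
--         if __topicFolds[foldID][indexID] == topicID: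
--             curIndexID = indexID
--             break
--     return curIndexID
--
-- def __getFoldAndIndexByTopic(topicID):
--     curFoldID = -1
--     curIndexID = -1
--     for foldID in range(__foldNum):
--         indexID = __getIndexByTopic(foldID, topicID)
--         if indexID != -1:
--             curFoldID = foldID
--             curIndexID = indexID
--             break
--     return curFoldID, curIndexID
-- ===== SOURCE B (Python) =====
-- __foldNum = 5
--
-- __topicsNumPerFold = 6
--
-- __topicFolds = ((28, 29, 25, 22, 6, 7),
--                 (26, 11, 1, 18, 21, 4),
--                 (19, 24, 27, 30, 12, 23),
--                 (13, 14, 3, 16, 8, 9),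
--                 (15, 20, 5, 10, 17, 2))
--
-- # Precomputed once: topicID -> (foldID, indexID)
-- __lookup = {t: (f, i)
--             for f, row in enumerate(__topicFolds)
--             for i, t in enumerate(row)}
--
-- def __getFoldAndIndexByTopic(topicID):
--     return __lookup.get(topicID, (-1, -1))
-- ===== Notes on version B (the rewrite author's own statement) =====
-- stated objective: idiomatic
-- what changed: Replaced the nested loops over the fold table (with a helper scanning each row) by a module-level dict precomputed once from the enumerated table, so the function is a single dict lookup with default (-1, -1).
import Mathlib
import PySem

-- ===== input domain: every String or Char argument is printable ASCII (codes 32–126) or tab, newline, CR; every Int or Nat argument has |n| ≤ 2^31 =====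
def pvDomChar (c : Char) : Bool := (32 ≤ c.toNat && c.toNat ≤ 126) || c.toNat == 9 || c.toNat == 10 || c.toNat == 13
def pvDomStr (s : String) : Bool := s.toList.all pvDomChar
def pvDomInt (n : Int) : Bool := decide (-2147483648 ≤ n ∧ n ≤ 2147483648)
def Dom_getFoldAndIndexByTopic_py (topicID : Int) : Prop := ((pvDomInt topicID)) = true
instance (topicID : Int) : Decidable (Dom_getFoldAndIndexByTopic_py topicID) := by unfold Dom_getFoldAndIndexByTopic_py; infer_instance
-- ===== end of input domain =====

-- B replaces the nested table scan by a dict precomputed once from the enumerated table (idiomatic, O(1) lookup).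

-- ===== PORT A =====
def pvTopicFolds : List (List Int) :=
  [[28, 29, 25, 22, 6, 7],
   [26, 11, 1, 18, 21, 4],
   [19, 24, 27, 30, 12, 23],
   [13, 14, 3, 16, 8, 9],
   [15, 20, 5, 10, 17, 2]]

-- inner loop of __getIndexByTopic: for indexID in range(6), break on match
def pvIdxLoop (foldID topicID : Int) : List Int → Int
  | [] => -1
  | i :: rest =>
    if (PySem.List.pyGet? pvTopicFolds foldID).bind (fun row => PySem.List.pyGet? row i) = some topicID
    then i else pvIdxLoop foldID topicID rest

def getIndexByTopic_py (foldID topicID : Int) : Int :=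
  pvIdxLoop foldID topicID (PySem.List.pyRange 0 6 1)

-- outer loop: for foldID in range(5), break when indexID != -1
def pvFoldLoop (topicID : Int) : List Int → Int × Int
  | [] => (-1, -1)
  | f :: rest =>
    let indexID := getIndexByTopic_py f topicID
    if indexID ≠ -1 then (f, indexID) else pvFoldLoop topicID rest

def getFoldAndIndexByTopic_py (topicID : Int) : Int × Int :=
  pvFoldLoop topicID (PySem.List.pyRange 0 5 1)

-- ===== PORT B =====
def pvTopicFoldsAlt : List (List Int) :=
  [[28, 29, 25, 22, 6, 7],
   [26, 11, 1, 18, 21, 4],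
   [19, 24, 27, 30, 12, 23],
   [13, 14, 3, 16, 8, 9],
   [15, 20, 5, 10, 17, 2]]

-- the dict comprehension over the doubly-enumerated table, built once
def pvLookup : PySem.Dict Int (Int × Int) :=
  (PySem.List.enumerate pvTopicFoldsAlt).foldl
    (fun d fr => (PySem.List.enumerate fr.2).foldl (fun d it => d.insert it.2 (fr.1, it.1)) d)
    PySem.Dict.empty

def getFoldAndIndexByTopic_py_alt (topicID : Int) : Int × Int :=
  pvLookup.getD topicID (-1, -1)

-- ===== PRECONDITION & SPEC =====
def Spec_getFoldAndIndexByTopic_py (topicID : Int) (out : Int × Int) : Prop := out = getFoldAndIndexByTopic_py_alt topicID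
instance (topicID : Int) (out : Int × Int) : Decidable (Spec_getFoldAndIndexByTopic_py topicID out) := by unfold Spec_getFoldAndIndexByTopic_py; infer_instance

-- ===== CLAIM (what is proved, stated in full; the proofs are below) =====
def Claim_equal_getFoldAndIndexByTopic_py : Prop := ∀ (topicID : Int), Dom_getFoldAndIndexByTopic_py topicID → Spec_getFoldAndIndexByTopic_py topicID (getFoldAndIndexByTopic_py topicID)

-- ===== LEMMAS AND PROOFS =====

-- the 30 topic IDs present in the table
def pvAllTopics : List Int :=
  [28, 29, 25, 22, 6, 7, 26, 11, 1, 18, 21, 4, 19, 24, 27, 30, 12, 23,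
   13, 14, 3, 16, 8, 9, 15, 20, 5, 10, 17, 2]

theorem pv_A_default (t : Int) (h : t ∉ pvAllTopics) : getFoldAndIndexByTopic_py t = (-1, -1) := by
  simp [pvAllTopics] at h
  have hr5 : PySem.List.pyRange 0 5 1 = [0, 1, 2, 3, 4] := by decide
  have hr6 : PySem.List.pyRange 0 6 1 = [0, 1, 2, 3, 4, 5] := by decide
  obtain ⟨h1, h2, h3, h4, h5, h6, h7, h8, h9, h10, h11, h12, h13, h14, h15,
    h16, h17, h18, h19, h20, h21, h22, h23, h24, h25, h26, h27, h28, h29, h30⟩ := h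
  simp [getFoldAndIndexByTopic_py, pvFoldLoop, getIndexByTopic_py, pvIdxLoop,
    pvTopicFolds, hr5, hr6, PySem.List.pyGet?, PySem.List.pyIdx?,
    Ne.symm h1, Ne.symm h2, Ne.symm h3, Ne.symm h4, Ne.symm h5, Ne.symm h6,
    Ne.symm h7, Ne.symm h8, Ne.symm h9, Ne.symm h10, Ne.symm h11, Ne.symm h12,
    Ne.symm h13, Ne.symm h14, Ne.symm h15, Ne.symm h16, Ne.symm h17, Ne.symm h18,
    Ne.symm h19, Ne.symm h20, Ne.symm h21, Ne.symm h22, Ne.symm h23, Ne.symm h24,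
    Ne.symm h25, Ne.symm h26, Ne.symm h27, Ne.symm h28, Ne.symm h29, Ne.symm h30]

theorem pv_B_default (t : Int) (h : t ∉ pvAllTopics) : getFoldAndIndexByTopic_py_alt t = (-1, -1) := by
  simp [pvAllTopics] at h
  obtain ⟨h1, h2, h3, h4, h5, h6, h7, h8, h9, h10, h11, h12, h13, h14, h15,
    h16, h17, h18, h19, h20, h21, h22, h23, h24, h25, h26, h27, h28, h29, h30⟩ := h
  have b1 : ((28 : Int) == t) = false := by simpa using Ne.symm h1
  have b2 : ((29 : Int) == t) = false := by simpa using Ne.symm h2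
  have b3 : ((25 : Int) == t) = false := by simpa using Ne.symm h3
  have b4 : ((22 : Int) == t) = false := by simpa using Ne.symm h4
  have b5 : ((6 : Int) == t) = false := by simpa using Ne.symm h5
  have b6 : ((7 : Int) == t) = false := by simpa using Ne.symm h6
  have b7 : ((26 : Int) == t) = false := by simpa using Ne.symm h7
  have b8 : ((11 : Int) == t) = false := by simpa using Ne.symm h8
  have b9 : ((1 : Int) == t) = false := by simpa using Ne.symm h9
  have b10 : ((18 : Int) == t) = false := by simpa using Ne.symm h10
  have b11 : ((21 : Int) == t) = false := by simpa using Ne.symm h11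
  have b12 : ((4 : Int) == t) = false := by simpa using Ne.symm h12
  have b13 : ((19 : Int) == t) = false := by simpa using Ne.symm h13
  have b14 : ((24 : Int) == t) = false := by simpa using Ne.symm h14
  have b15 : ((27 : Int) == t) = false := by simpa using Ne.symm h15
  have b16 : ((30 : Int) == t) = false := by simpa using Ne.symm h16
  have b17 : ((12 : Int) == t) = false := by simpa using Ne.symm h17
  have b18 : ((23 : Int) == t) = false := by simpa using Ne.symm h18
  have b19 : ((13 : Int) == t) = false := by simpa using Ne.symm h19
  have b20 : ((14 : Int) == t) = false := by simpa using Ne.symm h20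
  have b21 : ((3 : Int) == t) = false := by simpa using Ne.symm h21
  have b22 : ((16 : Int) == t) = false := by simpa using Ne.symm h22
  have b23 : ((8 : Int) == t) = false := by simpa using Ne.symm h23
  have b24 : ((9 : Int) == t) = false := by simpa using Ne.symm h24
  have b25 : ((15 : Int) == t) = false := by simpa using Ne.symm h25
  have b26 : ((20 : Int) == t) = false := by simpa using Ne.symm h26
  have b27 : ((5 : Int) == t) = false := by simpa using Ne.symm h27
  have b28 : ((10 : Int) == t) = false := by simpa using Ne.symm h28
  have b29 : ((17 : Int) == t) = false := by simpa using Ne.symm h29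
  have b30 : ((2 : Int) == t) = false := by simpa using Ne.symm h30
  simp [getFoldAndIndexByTopic_py_alt, pvLookup, pvTopicFoldsAlt,
    PySem.List.enumerate, PySem.Dict.getD, PySem.Dict.get?, PySem.Dict.insert, PySem.Dict.empty,
    List.find?, b1, b2, b3, b4, b5, b6, b7, b8, b9, b10, b11, b12, b13, b14, b15, b16, b17, b18, b19, b20, b21, b22, b23, b24, b25, b26, b27, b28, b29, b30]

-- ===== VERDICT (by name: the statement is the Claim_ definition above) =====
theorem getFoldAndIndexByTopic_py_spec : Claim_equal_getFoldAndIndexByTopic_py := by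
  intro t _
  unfold Spec_getFoldAndIndexByTopic_py
  by_cases h : t ∈ pvAllTopics
  · fin_cases h <;> decide
  · rw [pv_A_default t h, pv_B_default t h]
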